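-- pv_equiv track=rewrite | github.com/sara1-l/ai-research-paper-assistant | analysis/current_paper_analysis.py | _methodology_diff
-- ===== SOURCE A (Python) =====
-- from typing import Any, List
--
-- def _methodology_diff(current: str, others: List[str]) -> str:
--     """Describe methodology differences."""
--     current_l = (current or "").lower()
--     others_combined = " ".join(o or "" for o in others).lower()
--
--     novel = []
--     if "deep" in current_l and "deep" not in others_combined:
--         novel.append("introduces deep learning")
--     if "transformer" in current_l or "lstm" in current_l:
--         if "transformer" not in others_combined and "lstm" not in others_combined:
--             novel.append("uses advanced architectures (Transformer/LSTM)")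
--     if "satellite" in current_l or "remote" in current_l:
--         if "satellite" not in others_combined and "remote" not in others_combined:
--             novel.append("employs satellite/remote sensing data")
--
--     if novel:
--         return "The current paper " + ", ".join(novel) + "."
--     return "The current paper uses a methodology that overlaps with some past studies."
-- ===== SOURCE B (Python) =====
-- from typing import List
--
-- # All eight possible outputs, indexed by a 3-bit mask:
-- # bit 2 = deep rule fired, bit 1 = architecture rule, bit 0 = satellite rule.
-- _ANSWERS = (
--     "The current paper uses a methodology that overlaps with some past studies.",
--     "The current paper employs satellite/remote sensing data.",
--     "The current paper uses advanced architectures (Transformer/LSTM).",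
--     "The current paper uses advanced architectures (Transformer/LSTM), employs satellite/remote sensing data.",
--     "The current paper introduces deep learning.",
--     "The current paper introduces deep learning, employs satellite/remote sensing data.",
--     "The current paper introduces deep learning, uses advanced architectures (Transformer/LSTM).",
--     "The current paper introduces deep learning, uses advanced architectures (Transformer/LSTM), employs satellite/remote sensing data.",
-- )
--
-- def _methodology_diff(current: str, others: List[str]) -> str:
--     """Describe methodology differences."""
--     cur = (current or "").lower()
--     oth = " ".join(o or "" for o in others).lower()
--     mask = (
--         (("deep" in cur) and ("deep" not in oth)) << 2
--         | ((("transformer" in cur) or ("lstm" in cur))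
--            and ("transformer" not in oth) and ("lstm" not in oth)) << 1
--         | ((("satellite" in cur) or ("remote" in cur))
--            and ("satellite" not in oth) and ("remote" not in oth))
--     )
--     return _ANSWERS[mask]
-- ===== Notes on version B (the rewrite author's own statement) =====
-- stated objective: alternative
-- what changed: Replaces accumulating a message list and joining it at runtime with a 3-bit rule mask used as a branch-free index into a precomputed table of all eight possible output sentences.
import Mathlib
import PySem

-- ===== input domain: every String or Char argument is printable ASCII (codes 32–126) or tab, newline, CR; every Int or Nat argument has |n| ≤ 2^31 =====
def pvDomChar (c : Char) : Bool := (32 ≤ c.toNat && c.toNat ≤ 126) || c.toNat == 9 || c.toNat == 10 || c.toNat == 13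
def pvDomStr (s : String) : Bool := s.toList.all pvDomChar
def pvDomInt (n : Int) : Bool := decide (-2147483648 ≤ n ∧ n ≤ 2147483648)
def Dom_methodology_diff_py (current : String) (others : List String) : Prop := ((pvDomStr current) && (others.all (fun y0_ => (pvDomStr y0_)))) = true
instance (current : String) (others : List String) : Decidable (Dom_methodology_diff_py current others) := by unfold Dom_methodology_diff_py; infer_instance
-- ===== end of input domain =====

-- B replaces A's message-list accumulation and runtime join with a 3-bit rule mask
-- indexing a precomputed table of all eight possible sentences (objective: alternative).

-- ===== PORT A =====
def methodology_diff_py (current : String) (others : List String) : String :=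
  let current_l := PySem.Str.lower current
  let others_combined := PySem.Str.lower (PySem.Str.join " " (others.map (fun o => o)))
  let novel : List String := []
  let novel := if PySem.Str.isIn "deep" current_l && !(PySem.Str.isIn "deep" others_combined)
    then novel ++ ["introduces deep learning"] else novel
  let novel := if PySem.Str.isIn "transformer" current_l || PySem.Str.isIn "lstm" current_l then
      (if !(PySem.Str.isIn "transformer" others_combined) && !(PySem.Str.isIn "lstm" others_combined)
        then novel ++ ["uses advanced architectures (Transformer/LSTM)"] else novel)
    else novel
  let novel := if PySem.Str.isIn "satellite" current_l || PySem.Str.isIn "remote" current_l then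
      (if !(PySem.Str.isIn "satellite" others_combined) && !(PySem.Str.isIn "remote" others_combined)
        then novel ++ ["employs satellite/remote sensing data"] else novel)
    else novel
  if novel ≠ [] then "The current paper " ++ PySem.Str.join ", " novel ++ "."
  else "The current paper uses a methodology that overlaps with some past studies."

-- ===== PORT B =====
-- The eight possible outputs, indexed by the 3-bit rule mask (tuple _ANSWERS in Source B).
def pvAnswers : List String :=
  [ "The current paper uses a methodology that overlaps with some past studies.",
    "The current paper employs satellite/remote sensing data.",
    "The current paper uses advanced architectures (Transformer/LSTM).",
    "The current paper uses advanced architectures (Transformer/LSTM), employs satellite/remote sensing data.",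
    "The current paper introduces deep learning.",
    "The current paper introduces deep learning, employs satellite/remote sensing data.",
    "The current paper introduces deep learning, uses advanced architectures (Transformer/LSTM).",
    "The current paper introduces deep learning, uses advanced architectures (Transformer/LSTM), employs satellite/remote sensing data." ]

def methodology_diff_py_alt (current : String) (others : List String) : String :=
  let cur := PySem.Str.lower current
  let oth := PySem.Str.lower (PySem.Str.join " " (others.map (fun o => o)))
  let mask : Nat :=
    (if PySem.Str.isIn "deep" cur && !(PySem.Str.isIn "deep" oth) then 1 else 0) * 4
    + (if (PySem.Str.isIn "transformer" cur || PySem.Str.isIn "lstm" cur)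
          && (!(PySem.Str.isIn "transformer" oth) && !(PySem.Str.isIn "lstm" oth)) then 1 else 0) * 2
    + (if (PySem.Str.isIn "satellite" cur || PySem.Str.isIn "remote" cur)
          && (!(PySem.Str.isIn "satellite" oth) && !(PySem.Str.isIn "remote" oth)) then 1 else 0)
  pvAnswers.getD mask ""

-- ===== PRECONDITION & SPEC =====
def Spec_methodology_diff_py (current : String) (others : List String) (out : String) : Prop := out = methodology_diff_py_alt current others
instance (current : String) (others : List String) (out : String) : Decidable (Spec_methodology_diff_py current others out) := by unfold Spec_methodology_diff_py; infer_instance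

-- ===== CLAIM =====
def Claim_equal_methodology_diff_py : Prop := ∀ (current : String) (others : List String), Dom_methodology_diff_py current others → Spec_methodology_diff_py current others (methodology_diff_py current others)

-- ===== LEMMAS AND PROOFS =====
theorem pv_if_if {α : Type} (p q : Bool) (x y : α) :
    (if p = true then (if q = true then x else y) else y) = (if (p && q) = true then x else y) := by
  cases p <;> cases q <;> rfl

-- ===== VERDICT =====
theorem methodology_diff_py_spec : Claim_equal_methodology_diff_py := by
  intro current others _
  unfold Spec_methodology_diff_py methodology_diff_py methodology_diff_py_alt pvAnswers
  dsimp only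
  rw [pv_if_if, pv_if_if]
  generalize (PySem.Str.isIn "deep" (PySem.Str.lower current) && !PySem.Str.isIn "deep" (PySem.Str.lower (PySem.Str.join " " (others.map fun o => o)))) = r1
  generalize ((PySem.Str.isIn "transformer" (PySem.Str.lower current) || PySem.Str.isIn "lstm" (PySem.Str.lower current)) && (!PySem.Str.isIn "transformer" (PySem.Str.lower (PySem.Str.join " " (others.map fun o => o))) && !PySem.Str.isIn "lstm" (PySem.Str.lower (PySem.Str.join " " (others.map fun o => o))))) = r2
  generalize ((PySem.Str.isIn "satellite" (PySem.Str.lower current) || PySem.Str.isIn "remote" (PySem.Str.lower current)) && (!PySem.Str.isIn "satellite" (PySem.Str.lower (PySem.Str.join " " (others.map fun o => o))) && !PySem.Str.isIn "remote" (PySem.Str.lower (PySem.Str.join " " (others.map fun o => o))))) = r3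
  cases r1 <;> cases r2 <;> cases r3 <;> rfl
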